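-- pv_equiv track=rewrite | github.com/ElginCahangirov/adventofcode | 2025/day08/part2.py | build_sorted_distances
-- ===== SOURCE A (Python) =====
-- def build_sorted_distances(distances_map: dict) -> list[tuple[int, tuple, tuple]]:
--     distance_to_points = {}
--     distances = set()
--     result = []
--
--     for p1 in distances_map:
--         for p2 in distances_map[p1]:
--             distance = distances_map[p1][p2]
--             distances.add(distance)
--             distance_to_points.setdefault(distance, [])
--             distance_to_points[distance].append((p1, p2))
--
--     for distance in sorted(distances):
--         for p1, p2 in distance_to_points[distance]:
--             result.append((distance, p1, p2))
--
--     return result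
-- ===== SOURCE B (Python) =====
-- def build_sorted_distances(distances_map: dict) -> list[tuple[int, tuple, tuple]]:
--     edges = [(distances_map[p1][p2], p1, p2)
--              for p1 in distances_map
--              for p2 in distances_map[p1]]
--     return sorted(edges, key=lambda e: e[0])
-- ===== Notes on version B (the rewrite author's own statement) =====
-- stated objective: simpler
-- what changed: Replaces A's bucket dict plus distance set plus grouped re-emission with one flat list of (distance, p1, p2) edges and a single stable sort keyed on the distance.
import Mathlib
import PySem

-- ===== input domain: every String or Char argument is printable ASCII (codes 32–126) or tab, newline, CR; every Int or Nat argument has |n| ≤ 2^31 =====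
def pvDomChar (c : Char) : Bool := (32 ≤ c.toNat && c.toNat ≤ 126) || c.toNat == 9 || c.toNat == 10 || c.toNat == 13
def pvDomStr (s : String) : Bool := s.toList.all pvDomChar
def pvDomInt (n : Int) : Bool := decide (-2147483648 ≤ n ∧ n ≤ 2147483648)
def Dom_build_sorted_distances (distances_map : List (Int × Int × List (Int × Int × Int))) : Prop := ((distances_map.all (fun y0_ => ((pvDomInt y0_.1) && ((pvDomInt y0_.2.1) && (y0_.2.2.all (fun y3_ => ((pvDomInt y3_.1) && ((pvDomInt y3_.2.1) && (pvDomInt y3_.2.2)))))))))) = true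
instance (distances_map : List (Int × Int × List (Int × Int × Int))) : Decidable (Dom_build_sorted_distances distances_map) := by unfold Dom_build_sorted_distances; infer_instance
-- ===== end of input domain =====

-- B replaces A's bucket-dict + sorted distance set with one flat edge list and a single
-- stable sort keyed on the distance (objective: simpler).

-- ===== PORT A =====
-- A: build distance_to_points (dict distance -> list of point pairs) and a set of
-- distances, then emit pairs grouped by each distance, distances in sorted order.
def build_sorted_distances (distances_map : List (Int × Int × List (Int × Int × Int))) : List (Int × (Int × Int) × (Int × Int)) :=
  let st := distances_map.foldl
    (fun st entry =>
      entry.2.2.foldl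
        (fun st pr =>
          let dist := pr.2.2
          let ds := PySem.Set.add st.2 dist
          let dtp := PySem.Dict.setdefault st.1 dist []
          (dtp.insert dist (dtp.getD dist [] ++ [((entry.1, entry.2.1), (pr.1, pr.2.1))]), ds))
        st)
    ((PySem.Dict.empty : PySem.Dict Int (List ((Int × Int) × (Int × Int)))), ([] : PySem.Set Int))
  (PySem.List.sorted st.2 (fun x => x) false).foldl
    (fun r dist => (st.1.getD dist []).foldl (fun r pq => r ++ [(dist, pq.1, pq.2)]) r) []

-- ===== PORT B =====
-- B: flat list of (distance, p1, p2) edges, then one stable sort by the distance.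
def build_sorted_distances_alt (distances_map : List (Int × Int × List (Int × Int × Int))) : List (Int × (Int × Int) × (Int × Int)) :=
  let edges := distances_map.flatMap
    (fun entry => entry.2.2.map (fun pr => (pr.2.2, (entry.1, entry.2.1), (pr.1, pr.2.1))))
  PySem.List.sorted edges (fun e => e.1) false

-- ===== PRECONDITION & SPEC =====
def Spec_build_sorted_distances (distances_map : List (Int × Int × List (Int × Int × Int))) (out : List (Int × (Int × Int) × (Int × Int))) : Prop := out = build_sorted_distances_alt distances_map
instance (distances_map : List (Int × Int × List (Int × Int × Int))) (out : List (Int × (Int × Int) × (Int × Int))) : Decidable (Spec_build_sorted_distances distances_map out) := by unfold Spec_build_sorted_distances; infer_instance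

-- ===== CLAIM (what is proved, stated in full; the proofs are below) =====
def Claim_equal_build_sorted_distances : Prop := ∀ (distances_map : List (Int × Int × List (Int × Int × Int))), Dom_build_sorted_distances distances_map → Spec_build_sorted_distances distances_map (build_sorted_distances distances_map)

-- ===== LEMMAS AND PROOFS =====

-- the flat edge list both sides are about
def pvEdges (m : List (Int × Int × List (Int × Int × Int))) : List (Int × (Int × Int) × (Int × Int)) :=
  m.flatMap (fun entry => entry.2.2.map (fun pr => (pr.2.2, (entry.1, entry.2.1), (pr.1, pr.2.1))))

-- A's per-edge state step
def pvF (st : PySem.Dict Int (List ((Int × Int) × (Int × Int))) × PySem.Set Int)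
    (e : Int × (Int × Int) × (Int × Int)) :
    PySem.Dict Int (List ((Int × Int) × (Int × Int))) × PySem.Set Int :=
  ((PySem.Dict.setdefault st.1 e.1 []).insert e.1
      ((PySem.Dict.setdefault st.1 e.1 []).getD e.1 [] ++ [e.2]),
   PySem.Set.add st.2 e.1)

-- l.foldl (r ++ [g x]) = r ++ l.map g
theorem pv_foldl_snoc {β γ : Type} (g : β → γ) :
    ∀ (l : List β) (r : List γ), l.foldl (fun r x => r ++ [g x]) r = r ++ l.map g := by
  intro l
  induction l with
  | nil => simp
  | cons x l ih => intro r; simp [ih]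

-- K.foldl (r ++ block d) = r ++ K.flatMap block
theorem pv_foldl_blocks {γ : Type} (block : Int → List γ) :
    ∀ (K : List Int) (r : List γ), K.foldl (fun r d => r ++ block d) r = r ++ K.flatMap block := by
  intro K
  induction K with
  | nil => simp
  | cons d K ih => intro r; simp [ih]

-- re-tagging a list whose elements all have key d is the identity
theorem pv_map_retag (d : Int) :
    ∀ (l : List (Int × (Int × Int) × (Int × Int))), (∀ e ∈ l, e.1 = d) →
      l.map (fun e => (d, e.2.1, e.2.2)) = l := by
  intro l
  induction l with
  | nil => intro _; rfl
  | cons e l ih =>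
    intro h
    have he : e.1 = d := h e (by simp)
    simp only [List.map_cons, ih (fun x hx => h x (by simp [hx]))]
    obtain ⟨a, b, c⟩ := e
    simp_all

-- filtering by key after a stable insert
theorem pv_filter_insertBy (x : Int × (Int × Int) × (Int × Int)) (d : Int) :
    ∀ (ys : List (Int × (Int × Int) × (Int × Int))),
      ys.Pairwise (fun a b => a.1 ≤ b.1) →
      (PySem.List.insertBy (fun a b => decide (a.1 < b.1)) x ys).filter (fun e => e.1 == d)
        = if x.1 = d then ys.filter (fun e => e.1 == d) ++ [x]
          else ys.filter (fun e => e.1 == d) := by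
  intro ys
  induction ys with
  | nil =>
    intro _
    show List.filter (fun e => e.1 == d) [x] = _
    by_cases h : x.1 = d <;> simp [h]
  | cons y ys ih =>
    intro hp
    have hpt : ys.Pairwise (fun a b => a.1 ≤ b.1) := hp.tail
    have hmin : ∀ e ∈ ys, y.1 ≤ e.1 := fun e he => (List.pairwise_cons.mp hp).1 e he
    simp only [PySem.List.insertBy]
    by_cases hlt : x.1 < y.1
    · simp only [decide_eq_true_eq, hlt, if_true]
      by_cases hxd : x.1 = d
      · have hnone : (y :: ys).filter (fun e => e.1 == d) = [] := by
          rw [List.filter_eq_nil_iff]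
          intro e he
          have h1 : y.1 ≤ e.1 := by
            rcases he with _ | he
            · exact le_refl _
            · exact hmin _ (by assumption)
          simp only [beq_iff_eq]
          omega
        simp [hxd, hnone]
      · rw [List.filter_cons]
        simp [hxd]
    · simp only [decide_eq_true_eq, hlt, if_false]
      rw [List.filter_cons, ih hpt, List.filter_cons]
      by_cases hxd : x.1 = d <;> by_cases hyd : (y.1 == d) = true <;>
        simp [hxd, hyd]

-- stable sort preserves the per-key filters
theorem pv_filter_sorted (d : Int) (xs : List (Int × (Int × Int) × (Int × Int))) :
    (PySem.List.sorted xs (fun e => e.1) false).filter (fun e => e.1 == d)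
      = xs.filter (fun e => e.1 == d) := by
  induction xs using List.reverseRecOn with
  | nil => rfl
  | append_singleton ys x ih =>
    have hs : PySem.List.sorted (ys ++ [x]) (fun e => e.1) false
        = PySem.List.insertBy (fun a b => decide (a.1 < b.1)) x (PySem.List.sorted ys (fun e => e.1) false) := by
      rw [PySem.List.sorted_eq_foldl_insertBy, PySem.List.sorted_eq_foldl_insertBy, List.foldl_append]
      rfl
    rw [hs, pv_filter_insertBy x d _ (PySem.List.sorted_pairwise ys (fun e => e.1)), ih,
      List.filter_append]
    by_cases h : x.1 = d <;> simp [h]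

-- a key-sorted list is determined by its per-key filters
theorem pv_unique :
    ∀ (ys zs : List (Int × (Int × Int) × (Int × Int))),
      ys.Pairwise (fun a b => a.1 ≤ b.1) → zs.Pairwise (fun a b => a.1 ≤ b.1) →
      (∀ d : Int, ys.filter (fun e => e.1 == d) = zs.filter (fun e => e.1 == d)) →
      ys = zs := by
  intro ys
  induction ys with
  | nil =>
    intro zs _ _ hf
    cases zs with
    | nil => rfl
    | cons b zs =>
      have := hf b.1
      simp at this
  | cons a ys ih =>
    intro zs hpy hpz hf
    cases zs with
    | nil =>
      have := hf a.1
      simp at this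
    | cons b zs =>
      have hminy : ∀ e ∈ ys, a.1 ≤ e.1 := (List.pairwise_cons.mp hpy).1
      have hminz : ∀ e ∈ zs, b.1 ≤ e.1 := (List.pairwise_cons.mp hpz).1
      have hab : a.1 = b.1 := by
        have hma : a ∈ (b :: zs).filter (fun e => e.1 == a.1) := by
          rw [← hf a.1]; simp
        have hmb : b ∈ (a :: ys).filter (fun e => e.1 == b.1) := by
          rw [hf b.1]; simp
        have h1 := List.mem_filter.mp hma
        have h2 := List.mem_filter.mp hmb
        have hba : b.1 ≤ a.1 := by
          rcases List.mem_cons.mp h1.1 with heq | hm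
          · rw [heq]
          · exact hminz _ hm
        have hab' : a.1 ≤ b.1 := by
          rcases List.mem_cons.mp h2.1 with heq | hm
          · rw [heq]
          · exact hminy _ hm
        omega
      have h1 := hf a.1
      rw [List.filter_cons, List.filter_cons, if_pos (by simp), if_pos (by simp [hab])] at h1
      rw [List.cons_eq_cons] at h1
      have htail : ∀ d : Int, ys.filter (fun e => e.1 == d) = zs.filter (fun e => e.1 == d) := by
        intro d
        by_cases hd : d = a.1
        · subst hd; exact h1.2
        · have h3 := hf d
          rw [List.filter_cons, List.filter_cons,
            if_neg (by simp; omega), if_neg (by simp; omega)] at h3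
          exact h3
      rw [h1.1, ih zs hpy.tail hpz.tail htail]

-- bucket invariant of A's building fold
theorem pv_inv_dict :
    ∀ (es : List (Int × (Int × Int) × (Int × Int)))
      (init : PySem.Dict Int (List ((Int × Int) × (Int × Int))) × PySem.Set Int) (d : Int),
      (es.foldl pvF init).1.getD d []
        = init.1.getD d [] ++ (es.filter (fun e => e.1 == d)).map (fun e => e.2) := by
  intro es
  induction es with
  | nil => simp
  | cons e es ih =>
    intro init d
    rw [List.foldl_cons, ih]
    rw [List.filter_cons]
    by_cases hd : e.1 = d
    · subst hd
      have : (pvF init e).1.getD e.1 [] = init.1.getD e.1 [] ++ [e.2] := by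
        simp [pvF, PySem.Dict.getD_setdefault_self]
      simp [this]
    · have : (pvF init e).1.getD d [] = init.1.getD d [] := by
        simp only [pvF]
        rw [PySem.Dict.getD_insert]
        rw [if_neg (by omega)]
        rw [PySem.Dict.getD, PySem.Dict.get?_setdefault_of_ne _ _ (by omega : d ≠ e.1)]
        rfl
      rw [this, if_neg (by simp; omega)]

-- distance-set invariant of A's building fold
theorem pv_inv_set :
    ∀ (es : List (Int × (Int × Int) × (Int × Int)))
      (init : PySem.Dict Int (List ((Int × Int) × (Int × Int))) × PySem.Set Int),
      (es.foldl pvF init).2 = es.foldl (fun s e => PySem.Set.add s e.1) init.2 := by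
  intro es
  induction es with
  | nil => intro _; rfl
  | cons e es ih => intro init; rw [List.foldl_cons, ih]; rfl

-- collapse a flatMap of at most one nonempty block
theorem pv_flatMap_single (d : Int) (L : List (Int × (Int × Int) × (Int × Int))) :
    ∀ (K : List Int), K.Nodup →
      K.flatMap (fun d' => if d' = d then L else []) = if d ∈ K then L else [] := by
  intro K
  induction K with
  | nil => simp
  | cons k K ih =>
    intro hnd
    rw [List.flatMap_cons, ih hnd.of_cons]
    by_cases hk : k = d
    · subst hk
      have : k ∉ K := (List.nodup_cons.mp hnd).1
      simp [this]
    · simp only [hk, if_false, List.nil_append]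
      by_cases hdm : d ∈ K
      · simp [hdm]
      · have hneg : ¬ (d = k ∨ d ∈ K) := fun h => h.elim (fun h1 => hk h1.symm) hdm
        rw [if_neg hdm, if_neg (by rw [List.mem_cons]; exact hneg)]

-- A's nested building loop is the per-edge fold over the flat edge list
theorem pv_fold_nested (m : List (Int × Int × List (Int × Int × Int)))
    (init : PySem.Dict Int (List ((Int × Int) × (Int × Int))) × PySem.Set Int) :
    m.foldl
      (fun st entry =>
        entry.2.2.foldl
          (fun st pr =>
            let dist := pr.2.2
            let ds := PySem.Set.add st.2 dist
            let dtp := PySem.Dict.setdefault st.1 dist []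
            (dtp.insert dist (dtp.getD dist [] ++ [((entry.1, entry.2.1), (pr.1, pr.2.1))]), ds))
          st)
      init
    = (pvEdges m).foldl pvF init := by
  rw [pvEdges, List.foldl_flatMap]
  simp only [List.foldl_map]
  rfl

-- A's result in closed form: per-distance blocks in sorted distance order
theorem pv_A_char (m : List (Int × Int × List (Int × Int × Int))) :
    build_sorted_distances m
      = (PySem.List.sorted (PySem.Set.ofList ((pvEdges m).map (fun e => e.1))) (fun x => x) false).flatMap
          (fun d => (pvEdges m).filter (fun e => e.1 == d)) := by
  simp only [build_sorted_distances]
  rw [pv_fold_nested]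
  have hset : ((pvEdges m).foldl pvF (PySem.Dict.empty, [])).2
      = PySem.Set.ofList ((pvEdges m).map (fun e => e.1)) := by
    rw [pv_inv_set, PySem.Set.ofList_eq_foldl, List.foldl_map]
  have hdict : ∀ d, ((pvEdges m).foldl pvF (PySem.Dict.empty, [])).1.getD d []
      = ((pvEdges m).filter (fun e => e.1 == d)).map (fun e => e.2) := by
    intro d
    rw [pv_inv_dict]
    rfl
  simp only [hset, hdict, pv_foldl_snoc, pv_foldl_blocks, List.nil_append, List.map_map]
  congr 1
  funext d
  apply pv_map_retag
  intro e he
  have := (List.mem_filter.mp he).2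
  simpa using this

-- main equality: A's grouped output IS the stable sort of the flat edge list
theorem pv_main (m : List (Int × Int × List (Int × Int × Int))) :
    build_sorted_distances m = build_sorted_distances_alt m := by
  rw [pv_A_char]
  show _ = PySem.List.sorted (pvEdges m) (fun e => e.1) false
  set es := pvEdges m with hes
  set K := PySem.List.sorted (PySem.Set.ofList (es.map (fun e => e.1))) (fun x => x) false with hK
  have hKlt : K.Pairwise (fun a b => a < b) := PySem.List.sorted_ofList_pairwise_lt _
  have hKnd : K.Nodup := hKlt.imp (fun h => ne_of_lt h)
  have hKmem : ∀ d : Int, d ∈ K ↔ d ∈ es.map (fun e => e.1) := by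
    intro d
    rw [hK, PySem.List.mem_sorted, PySem.Set.mem_ofList]
  apply pv_unique
  · rw [List.pairwise_flatMap]
    constructor
    · intro d _
      apply List.pairwise_of_forall_mem_list
      intro a ha b hb
      have h1 := (List.mem_filter.mp ha).2
      have h2 := (List.mem_filter.mp hb).2
      simp only [beq_iff_eq] at h1 h2
      omega
    · refine hKlt.imp ?_
      intro a b hab x hx y hy
      have h1 := (List.mem_filter.mp hx).2
      have h2 := (List.mem_filter.mp hy).2
      simp only [beq_iff_eq] at h1 h2
      omega
  · exact PySem.List.sorted_pairwise _ _
  · intro d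
    rw [pv_filter_sorted, List.filter_flatMap]
    have hblock : (fun d' => (es.filter (fun e => e.1 == d')).filter (fun e => e.1 == d))
        = (fun d' => if d' = d then es.filter (fun e => e.1 == d) else []) := by
      funext d'
      by_cases hdd : d' = d
      · subst hdd
        rw [if_pos rfl, List.filter_filter]
        apply List.filter_congr
        intro e _
        simp
      · rw [if_neg hdd, List.filter_eq_nil_iff]
        intro e he
        have h1 := (List.mem_filter.mp he).2
        simp only [beq_iff_eq] at h1 ⊢
        omega
    rw [hblock, pv_flatMap_single d _ K hKnd]
    by_cases hdm : d ∈ K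
    · rw [if_pos hdm]
    · rw [if_neg hdm, eq_comm, List.filter_eq_nil_iff]
      intro e he
      have : e.1 ∈ es.map (fun e => e.1) := List.mem_map.mpr ⟨e, he, rfl⟩
      simp only [beq_iff_eq]
      intro hc
      exact hdm ((hKmem d).mpr (hc ▸ this))

-- ===== VERDICT (by name: the statement is the Claim_ definition above) =====
theorem build_sorted_distances_spec : Claim_equal_build_sorted_distances := by
  intro m _
  unfold Spec_build_sorted_distances
  exact pv_main m
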